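-- pv_equiv track=rewrite | github.com/esmilc/TIP101_TF_Spr25 | Unit_2/Session2_HasDuplicates.py | hasDuplicates
-- ===== SOURCE A (Python) =====
-- def hasDuplicates(nums, k):
-- 	freqDict = {}
-- 	for i in range(k):
-- 		freqDict[nums[i]] = freqDict.get(nums[i], 0) + 1
-- 	for freq in freqDict.values():
-- 		if freq > 1:
-- 			return True
-- 	return False
-- ===== SOURCE B (Python) =====
-- def hasDuplicates(nums, k):
--     seen = set()
--     for i in range(k):
--         x = nums[i]
--         if x in seen:
--             return True
--         seen.add(x)
--     return False
-- ===== Notes on version B (the rewrite author's own statement) =====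
-- stated objective: idiomatic
-- what changed: Replaces the frequency-dict build plus a separate scan over its values by a single pass with a seen-set and an early return on the first repeated element.
import Mathlib
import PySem

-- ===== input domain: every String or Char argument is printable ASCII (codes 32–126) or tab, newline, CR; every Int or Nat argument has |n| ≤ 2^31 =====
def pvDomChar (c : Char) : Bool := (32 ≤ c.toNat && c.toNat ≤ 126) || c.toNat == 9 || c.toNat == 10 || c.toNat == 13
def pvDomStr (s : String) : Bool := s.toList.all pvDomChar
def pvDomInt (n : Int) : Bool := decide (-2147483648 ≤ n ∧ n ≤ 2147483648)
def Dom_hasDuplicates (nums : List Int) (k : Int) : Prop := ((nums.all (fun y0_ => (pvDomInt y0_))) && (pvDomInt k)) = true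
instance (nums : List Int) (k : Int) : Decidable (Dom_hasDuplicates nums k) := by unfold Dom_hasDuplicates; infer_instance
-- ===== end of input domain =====

-- B is idiomatic: one pass with a seen-set and an early return, instead of A's frequency dict plus a second scan over its values.

-- ===== PORT A =====
def hasDuplicates (nums : List Int) (k : Int) : Bool :=
  let freqDict : PySem.Dict Int Int :=
    (PySem.List.pyRange 0 k 1).foldl
      (fun d i => d.insert (PySem.List.pyGetD nums i 0) (d.getD (PySem.List.pyGetD nums i 0) 0 + 1))
      PySem.Dict.empty
  freqDict.values.any (fun freq => freq > 1)

-- ===== PORT B =====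
def hasDupGo (nums : List Int) (idxs : List Int) (seen : PySem.Set Int) : Bool :=
  match idxs with
  | [] => false
  | i :: rest =>
    let x := PySem.List.pyGetD nums i 0
    if x ∈ seen then true else hasDupGo nums rest (seen.add x)

def hasDuplicates_alt (nums : List Int) (k : Int) : Bool :=
  hasDupGo nums (PySem.List.pyRange 0 k 1) (PySem.Set.ofList [])

-- ===== PRECONDITION & SPEC =====
-- Pre_ excludes k > len(nums), where Python A (and B) raise IndexError on nums[i].
def Pre_hasDuplicates (nums : List Int) (k : Int) : Prop := k ≤ (nums.length : Int)
instance (nums : List Int) (k : Int) : Decidable (Pre_hasDuplicates nums k) := by unfold Pre_hasDuplicates; infer_instance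
def pvWitness_hasDuplicates : List Int × Int := ([1, 2, 1], 3)

def Spec_hasDuplicates (nums : List Int) (k : Int) (out : Bool) : Prop := out = hasDuplicates_alt nums k
instance (nums : List Int) (k : Int) (out : Bool) : Decidable (Spec_hasDuplicates nums k out) := by unfold Spec_hasDuplicates; infer_instance

-- ===== CLAIM (what is proved, stated in full; the proofs are below) =====
def Claim_equal_hasDuplicates : Prop := ∀ (nums : List Int) (k : Int), Dom_hasDuplicates nums k → Pre_hasDuplicates nums k → Spec_hasDuplicates nums k (hasDuplicates nums k)

-- ===== LEMMAS AND PROOFS =====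

-- A's dict-building fold over indices is Counter of the fetched values; any value > 1 means a repeat.
theorem anyCount_eq_not_nodup (vs : List Int) :
    (((PySem.Set.ofList vs).map (fun x => (vs.count x : Int))).any (fun freq => freq > 1))
      = decide (¬ vs.Nodup) := by
  rw [Bool.eq_iff_iff]
  simp only [List.any_eq_true, List.mem_map, PySem.Set.mem_ofList, decide_eq_true_eq, gt_iff_lt]
  constructor
  · rintro ⟨y, ⟨x, hxv, rfl⟩, h1⟩ hnd
    have h1' : 1 < vs.count x := by exact_mod_cast h1
    have hc := (List.nodup_iff_count_le_one.mp hnd) x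
    omega
  · intro hnd
    rw [List.nodup_iff_count_le_one] at hnd
    push Not at hnd
    obtain ⟨x, hx⟩ := hnd
    have h0 : 0 < vs.count x := by omega
    exact ⟨(vs.count x : Int), ⟨x, List.count_pos_iff.mp h0, rfl⟩, by exact_mod_cast hx⟩

theorem hasDuplicates_eq_not_nodup (nums : List Int) (k : Int) :
    hasDuplicates nums k
      = decide (¬ ((PySem.List.pyRange 0 k 1).map (fun i => PySem.List.pyGetD nums i 0)).Nodup) := by
  have h : (PySem.List.pyRange 0 k 1).foldl
      (fun d i => d.insert (PySem.List.pyGetD nums i 0) (d.getD (PySem.List.pyGetD nums i 0) 0 + 1))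
      PySem.Dict.empty
      = PySem.Dict.counter ((PySem.List.pyRange 0 k 1).map (fun i => PySem.List.pyGetD nums i 0)) := by
    rw [← PySem.Dict.foldl_insert_getD_add_one_eq_counter, List.foldl_map]
  have hv : (PySem.Dict.counter ((PySem.List.pyRange 0 k 1).map (fun i => PySem.List.pyGetD nums i 0))).values
      = (PySem.Set.ofList ((PySem.List.pyRange 0 k 1).map (fun i => PySem.List.pyGetD nums i 0))).map
          (fun x => (((PySem.List.pyRange 0 k 1).map (fun i => PySem.List.pyGetD nums i 0)).count x : Int)) := by
    simp only [PySem.Dict.values, PySem.Dict.items_counter, List.map_map]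
    rfl
  simp only [hasDuplicates, h, hv]
  exact anyCount_eq_not_nodup _

-- B's seen-set loop returns true iff a fetched value repeats or was already seen.
theorem hasDupGo_spec (nums : List Int) (idxs : List Int) (seen : PySem.Set Int) :
    hasDupGo nums idxs seen
      = decide (¬ (((idxs.map (fun i => PySem.List.pyGetD nums i 0)).Nodup)
          ∧ ∀ x ∈ idxs.map (fun i => PySem.List.pyGetD nums i 0), x ∉ seen)) := by
  induction idxs generalizing seen with
  | nil => simp [hasDupGo]
  | cons i rest ih =>
    simp only [hasDupGo, List.map_cons]
    by_cases hx : PySem.List.pyGetD nums i 0 ∈ seen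
    · rw [if_pos hx, Bool.eq_iff_iff]
      simp only [decide_eq_true_eq]
      constructor
      · intro _ ⟨_, hall⟩
        exact hall _ (List.mem_cons_self) hx
      · intro _; trivial
    · rw [if_neg hx, ih, Bool.eq_iff_iff]
      simp only [decide_eq_true_eq, List.nodup_cons, List.mem_cons, PySem.Set.mem_add]
      constructor
      · intro h hc
        apply h
        refine ⟨hc.1.2, fun x hxr hmem => ?_⟩
        rcases hmem with hs | heq
        · exact hc.2 x (Or.inr hxr) hs
        · exact hc.1.1 (heq ▸ hxr)
      · intro h hc
        apply h
        refine ⟨⟨fun hmem => ?_, hc.1⟩, fun x hxr => ?_⟩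
        · exact hc.2 _ hmem (Or.inr rfl)
        · rcases hxr with rfl | hxr
          · exact hx
          · exact fun hs => hc.2 x hxr (Or.inl hs)

-- ===== VERDICT (by name: the statement is the Claim_ definition above) =====
theorem hasDuplicates_spec : Claim_equal_hasDuplicates := by
  intro nums k _ _
  unfold Spec_hasDuplicates hasDuplicates_alt
  rw [hasDuplicates_eq_not_nodup, hasDupGo_spec]
  simp [PySem.Set.ofList]
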